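-- pv_equiv track=rewrite | github.com/jiineq/InterviewQuestions | liveRampPractice3.py | solution
-- ===== SOURCE A (Python) =====
-- def solution(arr):
--     # Type your solution here
--     suml = 0;
--     sumr = 0;
--     lenl = 1;
--     lenr = 1;
--     curl = 1;
--     curr = 1;
--     if len(arr) == 0:
--         return ""
--     for i in arr[1:]:
--         if curl == 0 and curr == 0:
--             lenl = lenl * 2;
--             curl = lenl;
--             lenr = lenr * 2;
--             curr = lenr;
--         if curl != 0:
--             #print ("l", i, curl)
--             if (i == -1):
--                 lenl = lenl - 1
--             else:
--                 suml = suml + i;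
--             curl = curl - 1
--         elif curr != 0:
--             #print ("r", i)
--             if (i == -1):
--                 lenr = lenr - 1
--             else:
--                 sumr = sumr + i;
--             curr = curr - 1
--     if (sumr == suml):
--         return ""
--     if (sumr > suml):
--         return "Right"
--     else:
--         return "Left"
-- ===== SOURCE B (Python) =====
-- def solution(arr):
--     if len(arr) == 0:
--         return ""
--     it = iter(arr[1:])
--     suml = 0
--     sumr = 0
--     lenl = 1
--     lenr = 1
--     try:
--         while True:
--             if lenl == 0 and lenr == 0:
--                 break
--             for _ in range(lenl):
--                 i = next(it)
--                 if i == -1: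
--                     lenl -= 1
--                 else:
--                     suml += i
--             for _ in range(lenr):
--                 i = next(it)
--                 if i == -1:
--                     lenr -= 1
--                 else:
--                     sumr += i
--             lenl *= 2
--             lenr *= 2
--     except StopIteration:
--         pass
--     if suml == sumr:
--         return ""
--     return "Right" if sumr > suml else "Left"
-- ===== Notes on version B (the rewrite author's own statement) =====
-- stated objective: simpler
-- what changed: A simulates a six-variable per-element counter state machine over one flat loop; B consumes the array level by level with an iterator (a left group of lenl elements, then a right group of lenr elements, then double), so the two phase counters curl/curr disappear.
import Mathlib
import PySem

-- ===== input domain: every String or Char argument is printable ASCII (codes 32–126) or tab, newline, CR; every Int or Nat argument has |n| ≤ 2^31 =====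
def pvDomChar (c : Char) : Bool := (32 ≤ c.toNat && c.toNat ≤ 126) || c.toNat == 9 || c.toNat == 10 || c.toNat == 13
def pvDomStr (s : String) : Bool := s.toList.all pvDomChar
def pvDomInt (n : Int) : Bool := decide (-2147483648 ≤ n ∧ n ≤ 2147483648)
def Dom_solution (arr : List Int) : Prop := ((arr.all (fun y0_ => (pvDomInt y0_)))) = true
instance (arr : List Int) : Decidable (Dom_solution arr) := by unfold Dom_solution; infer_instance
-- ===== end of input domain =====

-- B replaces A's six-variable per-element counter machine by a level-by-level loop
-- (consume left group, consume right group, double); objective: simpler.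

-- ===== PORT A =====
-- the body of A's for-loop after the possible doubling, on the six current variables
def solStepCore (suml sumr lenl lenr curl curr i : Int) :
    Int × Int × Int × Int × Int × Int :=
  if curl ≠ 0 then
    if i = -1 then (suml, sumr, lenl - 1, lenr, curl - 1, curr)
    else (suml + i, sumr, lenl, lenr, curl - 1, curr)
  else if curr ≠ 0 then
    if i = -1 then (suml, sumr, lenl, lenr - 1, curl, curr - 1)
    else (suml, sumr + i, lenl, lenr, curl, curr - 1)
  else (suml, sumr, lenl, lenr, curl, curr)

-- one iteration of A's for-loop; state = (suml, sumr, lenl, lenr, curl, curr)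
def solStep (s : Int × Int × Int × Int × Int × Int) (i : Int) :
    Int × Int × Int × Int × Int × Int :=
  if s.2.2.2.2.1 = 0 ∧ s.2.2.2.2.2 = 0 then
    solStepCore s.1 s.2.1 (s.2.2.1 * 2) (s.2.2.2.1 * 2) (s.2.2.1 * 2) (s.2.2.2.1 * 2) i
  else
    solStepCore s.1 s.2.1 s.2.2.1 s.2.2.2.1 s.2.2.2.2.1 s.2.2.2.2.2 i

def solution (arr : List Int) : String :=
  if arr.length = 0 then ""
  else
    let s := (PySem.List.slice arr (some 1) none).foldl solStep (0, 0, 1, 1, 1, 1)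
    let suml := s.1
    let sumr := s.2.1
    if sumr = suml then "" else if sumr > suml then "Right" else "Left"

-- ===== PORT B =====
-- one group of B's inner for-loop: consume n elements from xs (stopping early when
-- xs is exhausted = the caught StopIteration); a -1 shrinks the running group length,
-- anything else joins the running sum.  The group lengths are nonnegative throughout
-- in Python B and the decrement fires at most n = len times per group, so Nat
-- subtraction here is exact.
def takeGroup : List Int → Nat → Nat → Int → List Int × Nat × Int
  | xs, 0, len, acc => (xs, len, acc)
  | [], _ + 1, len, acc => ([], len, acc)
  | x :: xs, n + 1, len, acc =>
      if x = -1 then takeGroup xs n (len - 1) acc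
      else takeGroup xs n len (acc + x)

theorem takeGroup_length_le (xs : List Int) (n len : Nat) (acc : Int) :
    (takeGroup xs n len acc).1.length ≤ xs.length := by
  induction xs generalizing n len acc with
  | nil => cases n <;> simp [takeGroup]
  | cons x xs ih =>
      cases n with
      | zero => simp [takeGroup]
      | succ m =>
          simp only [takeGroup]
          try norm_num
          split <;> exact Nat.le_succ_of_le (ih ..)

theorem takeGroup_length_lt (x : Int) (xs : List Int) (n len : Nat) (acc : Int) :
    (takeGroup (x :: xs) (n + 1) len acc).1.length < (x :: xs).length := by
  simp only [takeGroup]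
  split <;> exact Nat.lt_succ_of_le (takeGroup_length_le ..)

theorem takeGroup_zero (xs : List Int) (len : Nat) (acc : Int) :
    takeGroup xs 0 len acc = (xs, len, acc) := by simp [takeGroup]

-- B's outer while-loop, processing whole levels until the iterator is exhausted
-- or both group lengths have shrunk to zero
def levels (xs : List Int) (suml sumr : Int) (lenl lenr : Nat) : Int × Int :=
  if hz : lenl = 0 ∧ lenr = 0 then (suml, sumr)
  else if hx : xs = [] then (suml, sumr)
  else
    let p := takeGroup xs lenl lenl suml
    let q := takeGroup p.1 lenr lenr sumr
    levels q.1 p.2.2 q.2.2 (2 * p.2.1) (2 * q.2.1)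
termination_by xs.length
decreasing_by
  rcases Nat.eq_zero_or_pos lenl with hl | hl
  · subst hl
    have hr : lenr ≠ 0 := fun h0 => hz ⟨rfl, h0⟩
    obtain ⟨m, rfl⟩ := Nat.exists_eq_succ_of_ne_zero hr
    obtain ⟨y, ys, rfl⟩ := List.exists_cons_of_ne_nil hx
    rw [takeGroup_zero]
    exact takeGroup_length_lt ..
  · obtain ⟨m, rfl⟩ := Nat.exists_eq_succ_of_ne_zero (Nat.pos_iff_ne_zero.mp hl)
    obtain ⟨y, ys, rfl⟩ := List.exists_cons_of_ne_nil hx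
    exact Nat.lt_of_le_of_lt (takeGroup_length_le ..) (takeGroup_length_lt ..)

def solution_alt (arr : List Int) : String :=
  if arr.length = 0 then ""
  else
    let r := levels (arr.drop 1) 0 0 1 1
    if r.1 = r.2 then "" else if r.2 > r.1 then "Right" else "Left"

-- ===== PRECONDITION & SPEC =====
def Spec_solution (arr : List Int) (out : String) : Prop := out = solution_alt arr
instance (arr : List Int) (out : String) : Decidable (Spec_solution arr out) := by unfold Spec_solution; infer_instance

-- ===== CLAIM (what is proved, stated in full; the proofs are below) =====
def Claim_equal_solution : Prop := ∀ (arr : List Int), Dom_solution arr → Spec_solution arr (solution arr)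

-- ===== LEMMAS AND PROOFS =====

theorem takeGroup_nil (n len : Nat) (acc : Int) :
    takeGroup [] n len acc = ([], len, acc) := by cases n <;> simp [takeGroup]

-- projection to the two sums, the only part of A's state the final answer reads
def resA (s : Int × Int × Int × Int × Int × Int) : Int × Int := (s.1, s.2.1)

-- M1: A's fold starting at a level boundary (curl = curr = 0) computes B's levels
-- loop on the doubled lengths
def M1 (xs : List Int) : Prop :=
  ∀ (a b : Int) (L R : Nat),
    resA (xs.foldl solStep (a, b, (L : Int), (R : Int), 0, 0)) =
      levels xs a b (2 * L) (2 * R)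

-- M2: A's fold in the middle of the right group (curl = 0, c + 1 elements still to
-- take, running length R ≥ c + 1) finishes the group and continues as M1
def M2 (xs : List Int) : Prop :=
  ∀ (a b : Int) (L R c : Nat), c + 1 ≤ R →
    resA (xs.foldl solStep (a, b, (L : Int), (R : Int), 0, (c : Int) + 1)) =
      (let q := takeGroup xs (c + 1) R b
       levels q.1 a q.2.2 (2 * L) (2 * q.2.1))

-- M3: A's fold in the middle of the left group (c + 1 elements still to take,
-- running length L ≥ c + 1, curr still = lenr = R) finishes the level
def M3 (xs : List Int) : Prop :=
  ∀ (a b : Int) (L R c : Nat), c + 1 ≤ L →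
    resA (xs.foldl solStep (a, b, (L : Int), (R : Int), (c : Int) + 1, (R : Int))) =
      (let p := takeGroup xs (c + 1) L a
       let q := takeGroup p.1 R R b
       levels q.1 p.2.2 q.2.2 (2 * p.2.1) (2 * q.2.1))

theorem levels_zero (xs : List Int) (a b : Int) : levels xs a b 0 0 = (a, b) := by
  rw [levels]; simp

theorem levels_step (xs : List Int) (a b : Int) (lenl lenr : Nat)
    (h1 : ¬(lenl = 0 ∧ lenr = 0)) (h2 : xs ≠ []) :
    levels xs a b lenl lenr =
      (let p := takeGroup xs lenl lenl a
       let q := takeGroup p.1 lenr lenr b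
       levels q.1 p.2.2 q.2.2 (2 * p.2.1) (2 * q.2.1)) := by
  conv_lhs => rw [levels]
  simp [h1, h2]

theorem master_nil : M1 [] ∧ M2 [] ∧ M3 [] := by
  refine ⟨?_, ?_, ?_⟩
  · intro a b L R
    rcases Nat.eq_zero_or_pos L with hL | hL
    · rcases Nat.eq_zero_or_pos R with hR | hR
      · subst hL; subst hR; simp [resA, levels]
      · subst hL; rw [levels]; simp [resA, Nat.pos_iff_ne_zero.mp hR]
    · rw [levels]; simp [resA, Nat.pos_iff_ne_zero.mp hL]
  · intro a b L R c _
    rw [levels]; simp [resA, takeGroup]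
  · intro a b L R c hc
    simp only [List.foldl_nil, resA, takeGroup, takeGroup_nil]
    try norm_num
    rw [levels]
    split_ifs <;> simp_all
  
theorem master (N : Nat) :
    ∀ xs : List Int, xs.length ≤ N → M1 xs ∧ M2 xs ∧ M3 xs := by
  induction N with
  | zero =>
      intro xs hxs
      have : xs = [] := List.length_eq_zero_iff.mp (Nat.le_zero.mp hxs)
      subst this; exact master_nil
  | succ N ih =>
      intro xs hxs
      match xs with
      | [] => exact master_nil
      | x :: ys =>
        have hys : ys.length ≤ N := by simpa using Nat.lt_succ_iff.mp (by simpa using hxs)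
        obtain ⟨ih1, ih2, ih3⟩ := ih ys hys
        refine ⟨?_, ?_, ?_⟩
        · -- M1 on x :: ys: the step doubles the lengths, then takes the first
          -- element of the new level
          intro a b L R
          rw [List.foldl_cons]
          rcases Nat.eq_zero_or_pos L with hL | hL
          · subst hL
            rcases Nat.eq_zero_or_pos R with hR | hR
            · subst hR
              have hstep : solStep (a, b, ((0:Nat):Int), ((0:Nat):Int), 0, 0) x
                  = (a, b, ((0:Nat):Int), ((0:Nat):Int), 0, 0) := by
                simp [solStep, solStepCore]
              rw [hstep, ih1 a b 0 0]
              norm_num [levels_zero]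
            · obtain ⟨m, rfl⟩ : ∃ m, R = m + 1 := ⟨R - 1, by omega⟩
              by_cases hx : x = -1
              · have hstep : solStep (a, b, ((0:Nat):Int), ((m+1:Nat):Int), 0, 0) x
                    = (a, b, ((0:Nat):Int), ((2*m+1:Nat):Int), 0, ((2*m:Nat):Int) + 1) := by
                  simp [solStep, solStepCore, hx]
                  try split_ifs <;> simp_all [Prod.ext_iff] <;> omega
                  try simp_all [Prod.ext_iff] <;> omega
                rw [hstep, ih2 a b 0 (2*m+1) (2*m) (by omega)]
                rw [levels_step (x :: ys) a b (2*0) (2*(m+1)) (by omega) (by simp)]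
                have h2m : 2*(m+1) = (2*m+1)+1 := by ring
                simp only [takeGroup_zero, h2m, takeGroup, hx, if_pos rfl]
                try norm_num
              · have hstep : solStep (a, b, ((0:Nat):Int), ((m+1:Nat):Int), 0, 0) x
                    = (a, b + x, ((0:Nat):Int), ((2*m+2:Nat):Int), 0, ((2*m:Nat):Int) + 1) := by
                  simp [solStep, solStepCore, hx]
                  try split_ifs <;> simp_all [Prod.ext_iff] <;> omega
                  try simp_all [Prod.ext_iff] <;> omega
                rw [hstep, ih2 a (b + x) 0 (2*m+2) (2*m) (by omega)]
                rw [levels_step (x :: ys) a b (2*0) (2*(m+1)) (by omega) (by simp)]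
                have h2m : 2*(m+1) = (2*m+1)+1 := by ring
                simp only [takeGroup_zero, h2m, takeGroup, hx, if_neg hx]
                try norm_num
          · obtain ⟨m, rfl⟩ : ∃ m, L = m + 1 := ⟨L - 1, by omega⟩
            by_cases hx : x = -1
            · have hstep : solStep (a, b, ((m+1:Nat):Int), ((R:Nat):Int), 0, 0) x
                  = (a, b, ((2*m+1:Nat):Int), ((2*R:Nat):Int), ((2*m:Nat):Int) + 1, ((2*R:Nat):Int)) := by
                simp [solStep, solStepCore, hx]
                try split_ifs <;> simp_all [Prod.ext_iff] <;> omega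
                try simp_all [Prod.ext_iff] <;> omega
              rw [hstep, ih3 a b (2*m+1) (2*R) (2*m) (by omega)]
              rw [levels_step (x :: ys) a b (2*(m+1)) (2*R) (by omega) (by simp)]
              have h2m : 2*(m+1) = (2*m+1)+1 := by ring
              simp only [h2m, takeGroup, if_pos rfl, hx]
              try norm_num
            · have hstep : solStep (a, b, ((m+1:Nat):Int), ((R:Nat):Int), 0, 0) x
                  = (a + x, b, ((2*m+2:Nat):Int), ((2*R:Nat):Int), ((2*m:Nat):Int) + 1, ((2*R:Nat):Int)) := by
                simp [solStep, solStepCore, hx]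
                try split_ifs <;> simp_all [Prod.ext_iff] <;> omega
                try simp_all [Prod.ext_iff] <;> omega
              rw [hstep, ih3 (a + x) b (2*m+2) (2*R) (2*m) (by omega)]
              rw [levels_step (x :: ys) a b (2*(m+1)) (2*R) (by omega) (by simp)]
              have h2m : 2*(m+1) = (2*m+1)+1 := by ring
              simp only [h2m, takeGroup, if_neg hx]
              try norm_num
        · -- M2 on x :: ys: one more element of the right group
          intro a b L R c hc
          rw [List.foldl_cons]
          by_cases hx : x = -1
          · cases c with
            | zero =>
                have hstep : solStep (a, b, ((L:Nat):Int), ((R:Nat):Int), 0, ((0:Nat):Int) + 1) x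
                    = (a, b, ((L:Nat):Int), ((R-1:Nat):Int), 0, 0) := by
                  simp [solStep, solStepCore, hx]
                  try split_ifs <;> simp_all [Prod.ext_iff] <;> omega
                  try simp_all [Prod.ext_iff] <;> omega
                rw [hstep, ih1 a b L (R-1)]
                simp only [takeGroup, hx, if_pos rfl, takeGroup_zero]
                try norm_num
            | succ d =>
                have hstep : solStep (a, b, ((L:Nat):Int), ((R:Nat):Int), 0, ((d+1:Nat):Int) + 1) x
                    = (a, b, ((L:Nat):Int), ((R-1:Nat):Int), 0, ((d:Nat):Int) + 1) := by
                  simp [solStep, solStepCore, hx]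
                  try split_ifs <;> simp_all [Prod.ext_iff] <;> omega
                  try simp_all [Prod.ext_iff] <;> omega
                rw [hstep, ih2 a b L (R-1) d (by omega)]
                simp only [takeGroup, hx, if_pos rfl]
                try norm_num
          · cases c with
            | zero =>
                have hstep : solStep (a, b, ((L:Nat):Int), ((R:Nat):Int), 0, ((0:Nat):Int) + 1) x
                    = (a, b + x, ((L:Nat):Int), ((R:Nat):Int), 0, 0) := by
                  simp [solStep, solStepCore, hx]
                  try split_ifs <;> simp_all [Prod.ext_iff] <;> omega
                  try simp_all [Prod.ext_iff] <;> omega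
                rw [hstep, ih1 a (b + x) L R]
                simp only [takeGroup, if_neg hx, takeGroup_zero]
                try norm_num
            | succ d =>
                have hstep : solStep (a, b, ((L:Nat):Int), ((R:Nat):Int), 0, ((d+1:Nat):Int) + 1) x
                    = (a, b + x, ((L:Nat):Int), ((R:Nat):Int), 0, ((d:Nat):Int) + 1) := by
                  simp [solStep, solStepCore, hx]
                  try split_ifs <;> simp_all [Prod.ext_iff] <;> omega
                  try simp_all [Prod.ext_iff] <;> omega
                rw [hstep, ih2 a (b + x) L R d (by omega)]
                simp only [takeGroup, if_neg hx]
                try norm_num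
        · -- M3 on x :: ys: one more element of the left group
          intro a b L R c hc
          rw [List.foldl_cons]
          by_cases hx : x = -1
          · cases c with
            | zero =>
                rcases Nat.eq_zero_or_pos R with hR | hR
                · subst hR
                  have hstep : solStep (a, b, ((L:Nat):Int), ((0:Nat):Int), ((0:Nat):Int) + 1, ((0:Nat):Int)) x
                      = (a, b, ((L-1:Nat):Int), ((0:Nat):Int), 0, 0) := by
                    simp [solStep, solStepCore, hx]
                    try split_ifs <;> simp_all [Prod.ext_iff] <;> omega
                    try simp_all [Prod.ext_iff] <;> omega
                  rw [hstep, ih1 a b (L-1) 0]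
                  simp only [takeGroup, hx, if_pos rfl, takeGroup_zero, takeGroup_nil]
                  try norm_num
                · obtain ⟨e, rfl⟩ : ∃ e, R = e + 1 := ⟨R - 1, by omega⟩
                  have hstep : solStep (a, b, ((L:Nat):Int), ((e+1:Nat):Int), ((0:Nat):Int) + 1, ((e+1:Nat):Int)) x
                      = (a, b, ((L-1:Nat):Int), ((e+1:Nat):Int), 0, ((e:Nat):Int) + 1) := by
                    simp [solStep, solStepCore, hx]
                    try split_ifs <;> simp_all [Prod.ext_iff] <;> omega
                    try simp_all [Prod.ext_iff] <;> omega
                  rw [hstep, ih2 a b (L-1) (e+1) e (by omega)]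
                  simp only [takeGroup, hx, if_pos rfl, takeGroup_zero]
                  try norm_num
            | succ d =>
                have hstep : solStep (a, b, ((L:Nat):Int), ((R:Nat):Int), ((d+1:Nat):Int) + 1, ((R:Nat):Int)) x
                    = (a, b, ((L-1:Nat):Int), ((R:Nat):Int), ((d:Nat):Int) + 1, ((R:Nat):Int)) := by
                  simp [solStep, solStepCore, hx]
                  try split_ifs <;> simp_all [Prod.ext_iff] <;> omega
                  try simp_all [Prod.ext_iff] <;> omega
                rw [hstep, ih3 a b (L-1) R d (by omega)]
                simp only [takeGroup, hx, if_pos rfl]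
                try norm_num
          · cases c with
            | zero =>
                rcases Nat.eq_zero_or_pos R with hR | hR
                · subst hR
                  have hstep : solStep (a, b, ((L:Nat):Int), ((0:Nat):Int), ((0:Nat):Int) + 1, ((0:Nat):Int)) x
                      = (a + x, b, ((L:Nat):Int), ((0:Nat):Int), 0, 0) := by
                    simp [solStep, solStepCore, hx]
                    try split_ifs <;> simp_all [Prod.ext_iff] <;> omega
                    try simp_all [Prod.ext_iff] <;> omega
                  rw [hstep, ih1 (a + x) b L 0]
                  simp only [takeGroup, if_neg hx, takeGroup_zero, takeGroup_nil]
                  try norm_num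
                · obtain ⟨e, rfl⟩ : ∃ e, R = e + 1 := ⟨R - 1, by omega⟩
                  have hstep : solStep (a, b, ((L:Nat):Int), ((e+1:Nat):Int), ((0:Nat):Int) + 1, ((e+1:Nat):Int)) x
                      = (a + x, b, ((L:Nat):Int), ((e+1:Nat):Int), 0, ((e:Nat):Int) + 1) := by
                    simp [solStep, solStepCore, hx]
                    try split_ifs <;> simp_all [Prod.ext_iff] <;> omega
                    try simp_all [Prod.ext_iff] <;> omega
                  rw [hstep, ih2 (a + x) b L (e+1) e (by omega)]
                  simp only [takeGroup, if_neg hx, takeGroup_zero]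
                  try norm_num
            | succ d =>
                have hstep : solStep (a, b, ((L:Nat):Int), ((R:Nat):Int), ((d+1:Nat):Int) + 1, ((R:Nat):Int)) x
                    = (a + x, b, ((L:Nat):Int), ((R:Nat):Int), ((d:Nat):Int) + 1, ((R:Nat):Int)) := by
                  simp [solStep, solStepCore, hx]
                  try split_ifs <;> simp_all [Prod.ext_iff] <;> omega
                  try simp_all [Prod.ext_iff] <;> omega
                rw [hstep, ih3 (a + x) b L R d (by omega)]
                simp only [takeGroup, if_neg hx]
                try norm_num

theorem levels_nil (a b : Int) (L R : Nat) : levels [] a b L R = (a, b) := by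
  rw [levels]; split_ifs <;> simp_all

theorem levels_init (rest : List Int) :
    levels rest 0 0 1 1 =
      (let p := takeGroup rest 1 1 0
       let q := takeGroup p.1 1 1 0
       levels q.1 p.2.2 q.2.2 (2 * p.2.1) (2 * q.2.1)) := by
  cases rest with
  | nil => simp [takeGroup_nil, levels_nil]
  | cons y t => exact levels_step (y :: t) 0 0 1 1 (by omega) (by simp)

-- ===== VERDICT (by name: the statement is the Claim_ definition above) =====
theorem solution_spec : Claim_equal_solution := by
  unfold Claim_equal_solution
  intro arr _
  unfold Spec_solution solution solution_alt
  cases arr with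
  | nil => simp
  | cons x rest =>
      have hm := (master rest.length rest le_rfl).2.2 0 0 1 1 0 (by omega)
      norm_num at hm
      have hl := levels_init rest
      simp only [PySem.List.slice_from_one, List.tail_cons, List.drop_succ_cons,
        List.drop_zero, List.length_cons]
      rw [← hl] at hm
      have h1 : (List.foldl solStep (0, 0, 1, 1, 1, 1) rest).1
          = (levels rest 0 0 1 1).1 := by
        rw [← hm]; rfl
      have h2 : (List.foldl solStep (0, 0, 1, 1, 1, 1) rest).2.1
          = (levels rest 0 0 1 1).2 := by
        rw [← hm]; rfl
      simp only [show (rest.length + 1 ≠ 0) from by omega, if_neg]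
      split_ifs <;> first | rfl | omega
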